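-- pv_equiv track=rewrite | github.com/powderluv/baybridge | src/baybridge/ir.py | _compact_coords
-- ===== SOURCE A (Python) =====
-- def _compact_coords(linear_index: int, shape: tuple[int, ...]) -> tuple[int, ...]:
--     if len(shape) == 1:
--         return (linear_index,)
--     remaining = linear_index
--     coords: list[int] = []
--     for axis, dim in enumerate(shape):
--         if axis == len(shape) - 1:
--             coords.append(remaining)
--             break
--         coords.append(remaining % dim)
--         remaining //= dim
--     return tuple(coords)
-- ===== SOURCE B (Python) =====
-- def _compact_coords(linear_index: int, shape: tuple[int, ...]) -> tuple[int, ...]: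
--     n = len(shape)
--     if n == 0:
--         return ()
--     strides = []
--     s = 1
--     for d in shape:
--         strides.append(s)
--         s *= d
--     coords = [(linear_index // strides[i]) % shape[i] for i in range(n - 1)]
--     coords.append(linear_index // strides[n - 1])
--     return tuple(coords)
-- ===== Notes on version B (the rewrite author's own statement) =====
-- stated objective: alternative
-- what changed: B first builds a strides table (prefix products of the shape) and then computes every coordinate independently as (linear_index // stride[i]) % shape[i] (last axis without the modulus), instead of A's single loop threading a mutating 'remaining' quotient through successive divmods.
-- outside the precondition, e.g. on _compact_coords(7, (3, -2, 5)): A returns (1, 0, -1), B returns (1, 0, -2)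
import Mathlib
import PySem

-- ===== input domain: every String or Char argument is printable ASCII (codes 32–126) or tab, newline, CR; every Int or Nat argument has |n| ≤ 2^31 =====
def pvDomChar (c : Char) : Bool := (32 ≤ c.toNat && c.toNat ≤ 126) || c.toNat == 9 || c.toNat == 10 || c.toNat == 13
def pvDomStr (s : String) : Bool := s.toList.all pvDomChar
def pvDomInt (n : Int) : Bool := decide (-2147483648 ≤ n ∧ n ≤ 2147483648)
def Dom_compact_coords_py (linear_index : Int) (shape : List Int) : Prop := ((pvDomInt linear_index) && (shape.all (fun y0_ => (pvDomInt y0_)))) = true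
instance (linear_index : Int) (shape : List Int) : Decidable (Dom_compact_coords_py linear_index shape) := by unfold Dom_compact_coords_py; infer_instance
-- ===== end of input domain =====

-- B replaces A's mutating-quotient loop by a strides table plus independent per-axis
-- index arithmetic (objective: alternative decomposition, same O(n) cost).

-- ===== PORT A =====
-- the for-loop over enumerate(shape): the [_] case is 'axis == len(shape) - 1: append remaining; break'
def pvALoop (remaining : Int) : List Int → List Int
  | [] => []
  | [_] => [remaining]
  | d :: rest => PySem.Int.mod remaining d :: pvALoop (PySem.Int.floordiv remaining d) rest

def compact_coords_py (linear_index : Int) (shape : List Int) : List Int :=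
  if shape.length = 1 then [linear_index]
  else pvALoop linear_index shape

-- ===== PORT B =====
-- Source B's strides loop: the running product s is appended before each dim
def pvStridesAux (s : Int) : List Int → List Int
  | [] => []
  | d :: rest => s :: pvStridesAux (s * d) rest

def compact_coords_py_alt (linear_index : Int) (shape : List Int) : List Int :=
  if shape.length = 0 then []
  else
    let strides := pvStridesAux 1 shape
    let n := shape.length
    ((List.range (n - 1)).map (fun i =>
      PySem.Int.mod (PySem.Int.floordiv linear_index (strides.getD i 0)) (shape.getD i 0)))
    ++ [PySem.Int.floordiv linear_index (strides.getD (n - 1) 0)]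

-- ===== PRECONDITION & SPEC =====
-- Pre_ excludes shapes with a non-positive dimension before the last axis: a zero there makes A
-- raise ZeroDivisionError, and a negative dimension is meaningless for an array shape — a corner
-- where the successive-quotient and stride decompositions both give defensible but different values.
def Pre_compact_coords_py (linear_index : Int) (shape : List Int) : Prop :=
  ∀ d ∈ shape.dropLast, 0 < d
instance (linear_index : Int) (shape : List Int) : Decidable (Pre_compact_coords_py linear_index shape) := by unfold Pre_compact_coords_py; infer_instance

def pvWitness_compact_coords_py : Int × List Int := (7, [3, 4, 5])

def Spec_compact_coords_py (linear_index : Int) (shape : List Int) (out : List Int) : Prop := out = compact_coords_py_alt linear_index shape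
instance (linear_index : Int) (shape : List Int) (out : List Int) : Decidable (Spec_compact_coords_py linear_index shape out) := by unfold Spec_compact_coords_py; infer_instance

-- ===== CLAIM (what is proved, stated in full; the proofs are below) =====
def Claim_equal_compact_coords_py : Prop := ∀ (linear_index : Int) (shape : List Int), Dom_compact_coords_py linear_index shape → Pre_compact_coords_py linear_index shape → Spec_compact_coords_py linear_index shape (compact_coords_py linear_index shape)

-- ===== LEMMAS AND PROOFS =====

-- entry i of the strides table is s times the product of the first i dims
lemma pvStridesAux_getD (l : List Int) (s : Int) (i : Nat) (h : i < l.length) :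
    (pvStridesAux s l).getD i 0 = s * (l.take i).prod := by
  induction l generalizing s i with
  | nil => simp at h
  | cons d t ih =>
    cases i with
    | zero => simp [pvStridesAux]
    | succ i =>
      have hi : i < t.length := by simpa using h
      show (pvStridesAux s (d :: t)).getD (i + 1) 0 = s * (List.take (i + 1) (d :: t)).prod
      rw [show pvStridesAux s (d :: t) = s :: pvStridesAux (s * d) t from rfl,
        List.getD_cons_succ, ih (s * d) i hi]
      simp [mul_assoc]

lemma pvProdTakePos (l : List Int) (i : Nat) (hi : i < l.length)
    (h : ∀ d ∈ l.dropLast, 0 < d) : 0 < (l.take i).prod := by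
  induction l generalizing i with
  | nil => simp at hi
  | cons d t ih =>
    cases i with
    | zero => simp
    | succ i =>
      have hi2 : i < t.length := by simpa using hi
      cases t with
      | nil => simp at hi2
      | cons e tt =>
        have hd : 0 < d := h d (by simp [List.dropLast_cons₂])
        have hrest : ∀ x ∈ (e :: tt).dropLast, 0 < x := fun x hx =>
          h x (by rw [List.dropLast_cons₂]; exact List.mem_cons_of_mem _ hx)
        have := ih i hi2 hrest
        simp only [List.take_succ_cons, List.prod_cons]
        exact mul_pos hd this

-- successive floor division by positive divisors collapses to one division
lemma pvFdFd (x d s : Int) (hd : 0 < d) (hs : 0 < s) :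
    PySem.Int.floordiv x (d * s) = PySem.Int.floordiv (PySem.Int.floordiv x d) s := by
  rw [PySem.Int.floordiv_eq_ediv_of_pos hd, PySem.Int.floordiv_eq_ediv_of_pos hs,
    PySem.Int.floordiv_eq_ediv_of_pos (mul_pos hd hs)]
  exact (Int.ediv_ediv_of_nonneg (le_of_lt hd)).symm

lemma pvAltEqLoop (shape : List Int) : ∀ x : Int, (∀ d ∈ shape.dropLast, 0 < d) →
    compact_coords_py_alt x shape = pvALoop x shape := by
  induction shape with
  | nil => intro x _; simp [compact_coords_py_alt, pvALoop]
  | cons d t ih =>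
    intro x h
    cases t with
    | nil =>
      simp [compact_coords_py_alt, pvALoop, pvStridesAux, PySem.Int.floordiv_eq_ediv_of_pos]
    | cons e tt =>
      have hd : 0 < d := h d (by simp [List.dropLast_cons₂])
      have hrest : ∀ y ∈ (e :: tt).dropLast, 0 < y := fun y hy =>
        h y (by rw [List.dropLast_cons₂]; exact List.mem_cons_of_mem _ hy)
      have hstep : pvALoop x (d :: e :: tt) =
          PySem.Int.mod x d :: pvALoop (PySem.Int.floordiv x d) (e :: tt) := rfl
      rw [hstep, ← ih (PySem.Int.floordiv x d) hrest]
      simp only [compact_coords_py_alt, List.length_cons]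
      norm_num
      rw [List.range_succ_eq_map, List.map_cons, List.map_map, List.cons_append]
      have hcons : pvStridesAux 1 (d :: e :: tt) = 1 :: pvStridesAux (1 * d) (e :: tt) := rfl
      congr 1
      · rw [hcons]
        simp only [List.getElem?_cons_zero, Option.getD_some]
        rw [PySem.Int.floordiv_eq_ediv_of_pos (by norm_num : (0:Int) < 1), Int.ediv_one]
      congr 1
      · apply List.map_congr_left
        intro i hi
        have hi1 : i < (e :: tt).length := by
          simpa using Nat.lt_succ_of_lt (List.mem_range.mp hi)
        have hs1 : (pvStridesAux d (e :: tt))[i]?.getD 0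
            = d * ((e :: tt).take i).prod := by
          rw [← List.getD_eq_getElem?_getD]
          simpa using pvStridesAux_getD (e :: tt) d i hi1
        have hs2 : (pvStridesAux 1 (e :: tt))[i]?.getD 0
            = ((e :: tt).take i).prod := by
          rw [← List.getD_eq_getElem?_getD]
          simpa using pvStridesAux_getD (e :: tt) 1 i hi1
        have hp : 0 < ((e :: tt).take i).prod := pvProdTakePos (e :: tt) i hi1 hrest
        simp only [Function.comp_apply, hcons, List.getElem?_cons_succ, one_mul,
          Nat.succ_eq_add_one]
        rw [hs1, hs2, pvFdFd x d _ hd hp]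
      · have hi1 : tt.length < (e :: tt).length := by simp
        have hs1 : (pvStridesAux d (e :: tt))[tt.length]?.getD 0
            = d * ((e :: tt).take tt.length).prod := by
          rw [← List.getD_eq_getElem?_getD]
          simpa using pvStridesAux_getD (e :: tt) d tt.length hi1
        have hs2 : (pvStridesAux 1 (e :: tt))[tt.length]?.getD 0
            = ((e :: tt).take tt.length).prod := by
          rw [← List.getD_eq_getElem?_getD]
          simpa using pvStridesAux_getD (e :: tt) 1 tt.length hi1
        have hp : 0 < ((e :: tt).take tt.length).prod := pvProdTakePos (e :: tt) tt.length hi1 hrest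
        simp only [hcons, List.getElem?_cons_succ, one_mul]
        rw [hs1, hs2, pvFdFd x d _ hd hp]

lemma pvAeqLoop (x : Int) (shape : List Int) : compact_coords_py x shape = pvALoop x shape := by
  unfold compact_coords_py
  split_ifs with hl
  · match shape, hl with
    | [d], _ => rfl
  · rfl

-- ===== VERDICT (by name: the statement is the Claim_ definition above) =====
theorem compact_coords_py_spec : Claim_equal_compact_coords_py := by
  intro x shape _ hpre
  unfold Spec_compact_coords_py
  rw [pvAeqLoop, pvAltEqLoop shape x hpre]
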